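-- pv_equiv track=rewrite | github.com/nikitakrutoy/ProcessMiningPWC | tools/processmining/miners.py | get_no_causalities
-- ===== SOURCE A (Python) =====
-- def get_no_causalities(all_tasks, direct_followers):
--     ncs = []  # no causalities
--     for event in all_tasks:
--         for event2 in all_tasks:
--             if (event, event2) not in ncs:
--                 if (event, event2) not in direct_followers and \
--                    (event2, event) not in direct_followers:
--                     ncs.append((event, event2))
--     return ncs
-- ===== SOURCE B (Python) =====
-- def get_no_causalities(all_tasks, direct_followers):
--     # Dedup tasks once (first-appearance order), then emit pairs with no
--     # membership check on the growing result list.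
--     seen = []
--     for t in all_tasks:
--         if t not in seen:
--             seen.append(t)
--     ncs = []
--     for a in seen:
--         for b in seen:
--             if (a, b) not in direct_followers and (b, a) not in direct_followers:
--                 ncs.append((a, b))
--     return ncs
-- ===== Notes on version B (the rewrite author's own statement) =====
-- stated objective: simpler
-- what changed: B deduplicates all_tasks once into a first-occurrence-order unique list and then emits qualifying pairs over that list with a plain nested loop, eliminating A's per-pair 'not in ncs' membership scan of the growing result list.
import Mathlib
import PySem

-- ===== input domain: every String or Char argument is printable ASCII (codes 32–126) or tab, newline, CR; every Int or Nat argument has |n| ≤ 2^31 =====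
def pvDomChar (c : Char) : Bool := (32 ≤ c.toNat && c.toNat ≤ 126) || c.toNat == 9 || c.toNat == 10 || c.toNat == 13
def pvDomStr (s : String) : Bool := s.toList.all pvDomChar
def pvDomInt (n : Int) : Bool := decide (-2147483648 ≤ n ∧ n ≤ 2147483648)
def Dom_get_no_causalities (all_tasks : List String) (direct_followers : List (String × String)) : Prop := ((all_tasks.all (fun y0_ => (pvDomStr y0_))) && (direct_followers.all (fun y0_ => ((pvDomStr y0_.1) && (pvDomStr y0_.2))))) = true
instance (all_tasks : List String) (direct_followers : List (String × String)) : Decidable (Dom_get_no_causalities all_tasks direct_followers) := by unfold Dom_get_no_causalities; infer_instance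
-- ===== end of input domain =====

-- B deduplicates all_tasks once into a first-occurrence unique list and then emits
-- qualifying pairs with a plain nested loop, dropping A's per-pair scan of the result list.

-- ===== PORT A =====
def get_no_causalities (all_tasks : List String) (direct_followers : List (String × String)) : List (String × String) :=
  all_tasks.foldl (fun ncs event =>
    all_tasks.foldl (fun ncs event2 =>
      if (event, event2) ∈ ncs then ncs
      else if (event, event2) ∉ direct_followers ∧ (event2, event) ∉ direct_followers then
        ncs ++ [(event, event2)]
      else ncs) ncs) []

-- ===== PORT B =====
def get_no_causalities_alt (all_tasks : List String) (direct_followers : List (String × String)) : List (String × String) :=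
  let seen := all_tasks.foldl (fun s t => if t ∈ s then s else s ++ [t]) []
  seen.foldl (fun ncs a =>
    seen.foldl (fun ncs b =>
      if (a, b) ∉ direct_followers ∧ (b, a) ∉ direct_followers then ncs ++ [(a, b)]
      else ncs) ncs) []

-- ===== PRECONDITION & SPEC =====
def Spec_get_no_causalities (all_tasks : List String) (direct_followers : List (String × String)) (out : List (String × String)) : Prop := out = get_no_causalities_alt all_tasks direct_followers
instance (all_tasks : List String) (direct_followers : List (String × String)) (out : List (String × String)) : Decidable (Spec_get_no_causalities all_tasks direct_followers out) := by unfold Spec_get_no_causalities; infer_instance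

-- ===== CLAIM (what is proved, stated in full; the proofs are below) =====
def Claim_equal_get_no_causalities : Prop := ∀ (all_tasks : List String) (direct_followers : List (String × String)), Dom_get_no_causalities all_tasks direct_followers → Spec_get_no_causalities all_tasks direct_followers (get_no_causalities all_tasks direct_followers)

-- ===== LEMMAS AND PROOFS =====

-- new unique elements of L not already in done, in first-occurrence order
def pvUniq (done : List String) : List String → List String
  | [] => []
  | b :: L => if b ∈ done then pvUniq done L else b :: pvUniq (done ++ [b]) L

-- the pairs B's inner loop appends for a fixed first component e over a list U
def pvRow (dfs : List (String × String)) (e : String) (U : List String) : List (String × String) :=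
  (U.filter (fun b => decide ((e, b) ∉ dfs ∧ (b, e) ∉ dfs))).map (fun b => (e, b))

lemma mem_pvRow (dfs : List (String × String)) (e : String) (U : List String) (p : String × String) :
    p ∈ pvRow dfs e U ↔ p.1 = e ∧ p.2 ∈ U ∧ ((e, p.2) ∉ dfs ∧ (p.2, e) ∉ dfs) := by
  rcases p with ⟨x, y⟩
  constructor
  · intro h
    simp only [pvRow, List.mem_map, List.mem_filter] at h
    obtain ⟨b, ⟨hb, hc⟩, heq⟩ := h
    injection heq with h1 h2
    subst h1; subst h2
    simp only [decide_eq_true_eq] at hc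
    exact ⟨rfl, hb, hc⟩
  · rintro ⟨rfl, hy, hc⟩
    simp only [pvRow, List.mem_map, List.mem_filter]
    exact ⟨y, ⟨hy, by simpa using hc⟩, rfl⟩

lemma foldl_step_eq_uniq : ∀ (L done : List String),
    L.foldl (fun s t => if t ∈ s then s else s ++ [t]) done = done ++ pvUniq done L := by
  intro L
  induction L with
  | nil => intro done; simp [pvUniq]
  | cons b L ih =>
    intro done
    by_cases hb : b ∈ done <;> simp [List.foldl, pvUniq, hb, ih, List.append_assoc]

lemma mem_of_mem_uniq_src : ∀ (L done : List String) (x : String), x ∈ L → x ∈ done ∨ x ∈ pvUniq done L := by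
  intro L
  induction L with
  | nil => intro done x hx; cases hx
  | cons b L ih =>
    intro done x hx
    by_cases hb : b ∈ done
    · simp [pvUniq, hb]
      rcases List.mem_cons.mp hx with rfl | hx'
      · exact Or.inl hb
      · exact ih done x hx'
    · simp only [pvUniq, hb]
      rcases List.mem_cons.mp hx with rfl | hx'
      · simp
      · rcases ih (done ++ [b]) x hx' with h | h
        · rcases List.mem_append.mp h with h | h
          · exact Or.inl h
          · simp at h; subst h; simp
        · right; simp [h]

lemma uniq_nil_of_subset : ∀ (L done : List String), (∀ x ∈ L, x ∈ done) → pvUniq done L = [] := by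
  intro L
  induction L with
  | nil => intro done _; rfl
  | cons b L ih =>
    intro done h
    have hb : b ∈ done := h b (by simp)
    simp [pvUniq, hb]
    exact ih done (fun x hx => h x (by simp [hx]))

-- A's inner loop: with `done` recording exactly the second components already paired with e in acc
lemma innerA_eq (dfs : List (String × String)) (e : String) :
    ∀ (L : List String) (acc : List (String × String)) (done : List String),
    (∀ b, (e, b) ∈ acc ↔ (b ∈ done ∧ (e, b) ∉ dfs ∧ (b, e) ∉ dfs)) →
    L.foldl (fun ncs e2 =>
      if (e, e2) ∈ ncs then ncs
      else if (e, e2) ∉ dfs ∧ (e2, e) ∉ dfs then ncs ++ [(e, e2)] else ncs) acc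
    = acc ++ pvRow dfs e (pvUniq done L) := by
  intro L
  induction L with
  | nil => intro acc done _; simp [pvUniq, pvRow]
  | cons b L ih =>
    intro acc done hinv
    by_cases hmem : (e, b) ∈ acc
    · have hdone : b ∈ done := ((hinv b).mp hmem).1
      simp only [List.foldl, hmem, if_pos, pvUniq, hdone, if_pos]
      exact ih acc done hinv
    · by_cases hdone : b ∈ done
      · have hcond : ¬ ((e, b) ∉ dfs ∧ (b, e) ∉ dfs) := by
          intro hc; exact hmem ((hinv b).mpr ⟨hdone, hc⟩)
        simp only [List.foldl, hmem, if_neg, not_false_iff, hcond, pvUniq, hdone, if_pos]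
        exact ih acc done hinv
      · by_cases hcond : (e, b) ∉ dfs ∧ (b, e) ∉ dfs
        · have hinv' : ∀ b', (e, b') ∈ acc ++ [(e, b)] ↔ (b' ∈ done ++ [b] ∧ (e, b') ∉ dfs ∧ (b', e) ∉ dfs) := by
            intro b'
            constructor
            · intro h
              rcases List.mem_append.mp h with h | h
              · have := (hinv b').mp h
                exact ⟨List.mem_append.mpr (Or.inl this.1), this.2⟩
              · have hb' : b' = b := by simpa using h
                subst hb'
                exact ⟨List.mem_append.mpr (Or.inr (by simp)), hcond⟩
            · rintro ⟨h1, hc⟩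
              rcases List.mem_append.mp h1 with h1 | h1
              · exact List.mem_append.mpr (Or.inl ((hinv b').mpr ⟨h1, hc⟩))
              · have hb' : b' = b := by simpa using h1
                subst hb'
                exact List.mem_append.mpr (Or.inr (by simp))
          simp only [List.foldl]
          rw [if_neg hmem, if_pos hcond, ih (acc ++ [(e, b)]) (done ++ [b]) hinv']
          simp [pvUniq, hdone, pvRow, hcond.1, hcond.2, List.append_assoc]
        · have hinv' : ∀ b', (e, b') ∈ acc ↔ (b' ∈ done ++ [b] ∧ (e, b') ∉ dfs ∧ (b', e) ∉ dfs) := by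
            intro b'
            rw [hinv b']
            constructor
            · rintro ⟨h, hc⟩; exact ⟨List.mem_append.mpr (Or.inl h), hc⟩
            · rintro ⟨h1, hc⟩
              rcases List.mem_append.mp h1 with h1 | h1
              · exact ⟨h1, hc⟩
              · have hb' : b' = b := by simpa using h1
                subst hb'
                exact absurd hc hcond
          simp only [List.foldl]
          rw [if_neg hmem, if_neg hcond, ih acc (done ++ [b]) hinv']
          have hrow : pvRow dfs e (b :: pvUniq (done ++ [b]) L) = pvRow dfs e (pvUniq (done ++ [b]) L) := by
            simp only [pvRow, List.filter_cons]
            rw [if_neg (by simpa using hcond)]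
          simp [pvUniq, hdone, hrow]

-- A's outer loop over L, having already fully processed the first components in `done`
lemma outerA_eq (dfs : List (String × String)) (ts : List String) :
    ∀ (L : List String) (acc : List (String × String)) (done : List String),
    (∀ e b, (e, b) ∈ acc ↔ (e ∈ done ∧ b ∈ pvUniq [] ts ∧ (e, b) ∉ dfs ∧ (b, e) ∉ dfs)) →
    L.foldl (fun ncs event =>
      ts.foldl (fun ncs e2 =>
        if (event, e2) ∈ ncs then ncs
        else if (event, e2) ∉ dfs ∧ (e2, event) ∉ dfs then ncs ++ [(event, e2)] else ncs) ncs) acc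
    = acc ++ (pvUniq done L).flatMap (fun e => pvRow dfs e (pvUniq [] ts)) := by
  intro L
  induction L with
  | nil => intro acc done _; simp [pvUniq]
  | cons e L ih =>
    intro acc done hinv
    by_cases hdone : e ∈ done
    · have hrow : ts.foldl (fun ncs e2 =>
          if (e, e2) ∈ ncs then ncs
          else if (e, e2) ∉ dfs ∧ (e2, e) ∉ dfs then ncs ++ [(e, e2)] else ncs) acc = acc := by
        rw [innerA_eq dfs e ts acc (pvUniq [] ts)
          (fun b => by rw [hinv e b]; simp [hdone])]
        rw [uniq_nil_of_subset ts (pvUniq [] ts)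
          (fun x hx => (mem_of_mem_uniq_src ts [] x hx).resolve_left (by simp))]
        simp [pvRow]
      simp only [List.foldl, hrow, pvUniq, hdone, if_pos]
      exact ih acc done hinv
    · have hrow : ts.foldl (fun ncs e2 =>
          if (e, e2) ∈ ncs then ncs
          else if (e, e2) ∉ dfs ∧ (e2, e) ∉ dfs then ncs ++ [(e, e2)] else ncs) acc
          = acc ++ pvRow dfs e (pvUniq [] ts) := by
        have h := innerA_eq dfs e ts acc ([] : List String)
          (fun b => by
            rw [hinv e b]; simp [hdone])
        simpa using h
      have hinv' : ∀ e' b, (e', b) ∈ acc ++ pvRow dfs e (pvUniq [] ts) ↔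
          (e' ∈ done ++ [e] ∧ b ∈ pvUniq [] ts ∧ (e', b) ∉ dfs ∧ (b, e') ∉ dfs) := by
        intro e' b
        rw [List.mem_append, hinv e' b, mem_pvRow]
        constructor
        · rintro (⟨h1, h2⟩ | ⟨rfl, h2⟩)
          · exact ⟨List.mem_append.mpr (Or.inl h1), h2⟩
          · exact ⟨List.mem_append.mpr (Or.inr (by simp)), h2⟩
        · rintro ⟨h1, h2⟩
          rcases List.mem_append.mp h1 with h1 | h1
          · exact Or.inl ⟨h1, h2⟩
          · have he : e' = e := by simpa using h1
            subst he
            exact Or.inr ⟨rfl, h2⟩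
      simp only [List.foldl, hrow, pvUniq, hdone, if_neg, not_false_iff]
      rw [ih (acc ++ pvRow dfs e (pvUniq [] ts)) (done ++ [e]) hinv']
      simp [List.append_assoc]

-- B's inner loop is exactly pvRow
lemma innerB_eq (dfs : List (String × String)) (a : String) :
    ∀ (U : List String) (acc : List (String × String)),
    U.foldl (fun ncs b =>
      if (a, b) ∉ dfs ∧ (b, a) ∉ dfs then ncs ++ [(a, b)] else ncs) acc
    = acc ++ pvRow dfs a U := by
  intro U
  induction U with
  | nil => intro acc; simp [pvRow]
  | cons b U ih =>
    intro acc
    by_cases hc : (a, b) ∉ dfs ∧ (b, a) ∉ dfs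
    · simp only [List.foldl, hc]
      rw [ih]
      simp [pvRow, hc.1, hc.2, List.append_assoc]
    · simp only [List.foldl, hc, if_neg, not_false_iff]
      rw [ih]
      have : pvRow dfs a (b :: U) = pvRow dfs a U := by
        simp only [pvRow, List.filter_cons]
        rw [if_neg (by simpa using hc)]
      rw [this]

lemma altB_eq (dfs : List (String × String)) (U : List String) :
    U.foldl (fun ncs a =>
      U.foldl (fun ncs b =>
        if (a, b) ∉ dfs ∧ (b, a) ∉ dfs then ncs ++ [(a, b)] else ncs) ncs) []
    = U.flatMap (fun e => pvRow dfs e U) := by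
  have h : U.foldl (fun ncs a =>
      U.foldl (fun ncs b =>
        if (a, b) ∉ dfs ∧ (b, a) ∉ dfs then ncs ++ [(a, b)] else ncs) ncs) []
      = U.foldl (fun ncs a => ncs ++ pvRow dfs a U) [] := by
    apply PySem.List.foldl_congr_mem
    intro acc a _
    exact innerB_eq dfs a U acc
  rw [h, PySem.List.foldl_append_eq_flatMap]
  simp

-- ===== VERDICT (by name: the statement is the Claim_ definition above) =====
theorem get_no_causalities_spec : Claim_equal_get_no_causalities := by
  intro ts dfs _
  unfold Spec_get_no_causalities get_no_causalities get_no_causalities_alt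
  rw [outerA_eq dfs ts ts [] [] (fun e b => by simp)]
  rw [foldl_step_eq_uniq ts []]
  simp only [List.nil_append]
  rw [altB_eq dfs (pvUniq [] ts)]
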